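-- pv_equiv track=rewrite | github.com/ucdevinda123/ArchtectureAppMain | generated_themev3.py | build_color_set_data_classes
-- ===== SOURCE A (Python) =====
-- def build_color_set_data_classes(field_specs):
--     set1 = [fs[0] for fs in field_specs[0:100]]
--     set2 = [fs[0] for fs in field_specs[100:200]]
--     set3 = [fs[0] for fs in field_specs[200:300]]
--
--     chunks = []
--
--     def build_one(cls, names):
--         if not names:
--             return
--         chunks.append(f"data class {cls}(")
--         for i, name in enumerate(names):
--             comma = "," if i < len(names) - 1 else ""
--             chunks.append(f"    val {name}: Color{comma}")
--         chunks.append(")")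
--         chunks.append("")
--
--     build_one("ColorSetOne", set1)
--     build_one("ColorSetTwo", set2)
--     build_one("ColorSetThree", set3)
--
--     return "\n".join(chunks).rstrip()
-- ===== SOURCE B (Python) =====
-- def build_color_set_data_classes(field_specs):
--     classes = ("ColorSetOne", "ColorSetTwo", "ColorSetThree")
--     out = ""
--     for i, fs in enumerate(field_specs[:300]):
--         if i % 100 == 0:
--             out += ("\n)\n\n" if i else "") + "data class " + classes[i // 100] + "(\n"
--         else:
--             out += ",\n"
--         out += "    val " + fs[0] + ": Color"
--     return out + ("\n)" if out else "")
-- ===== Notes on version B (the rewrite author's own statement) =====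
-- stated objective: alternative
-- what changed: B streams the output in a single pass over the first 300 specs with one string accumulator, emitting a class header on i%100==0 boundaries, a ',\n' separator otherwise and one trailing ')' at the end, instead of A's three-slice staged build of a shared line list with per-line index comma conditionals, sentinel empties and a final rstrip.
import Mathlib
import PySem

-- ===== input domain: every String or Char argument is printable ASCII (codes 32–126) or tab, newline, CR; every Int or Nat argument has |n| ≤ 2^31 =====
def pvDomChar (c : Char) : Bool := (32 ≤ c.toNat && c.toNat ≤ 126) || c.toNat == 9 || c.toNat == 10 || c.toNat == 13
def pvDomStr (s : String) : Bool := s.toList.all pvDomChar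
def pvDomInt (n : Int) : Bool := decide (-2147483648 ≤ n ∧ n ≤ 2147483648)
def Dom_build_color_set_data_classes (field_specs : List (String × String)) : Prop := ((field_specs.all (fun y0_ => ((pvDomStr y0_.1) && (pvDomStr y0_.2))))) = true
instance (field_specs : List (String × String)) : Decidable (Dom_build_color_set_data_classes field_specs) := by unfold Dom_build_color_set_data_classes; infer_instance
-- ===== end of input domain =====

-- B streams the output in one pass over the first 300 specs with a single string accumulator
-- (header at each i%100==0 boundary, "," via separator emission, one trailing ")"), instead of
-- A's three staged slices pushed as lines plus sentinel empties into a list then rstripped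
-- (objective: alternative).

-- ===== PORT A =====
-- the nested 'build_one': appends the header, the enumerated field lines, ")" and "" to 'chunks'
def pvBuildOne (cls : String) (names : List String) (chunks : List String) : List String :=
  if names.isEmpty then chunks
  else
    ((PySem.List.enumerate names).foldl
      (fun acc p =>
        acc ++ ["    val " ++ p.2 ++ ": Color" ++ (if p.1 < (names.length : Int) - 1 then "," else "")])
      (chunks ++ ["data class " ++ cls ++ "("])) ++ [")", ""]

def build_color_set_data_classes (field_specs : List (String × String)) : String :=
  let set1 := (PySem.List.slice field_specs (some 0) (some 100)).map (fun fs => fs.1)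
  let set2 := (PySem.List.slice field_specs (some 100) (some 200)).map (fun fs => fs.1)
  let set3 := (PySem.List.slice field_specs (some 200) (some 300)).map (fun fs => fs.1)
  PySem.Str.rstrip (PySem.Str.join "\n"
    (pvBuildOne "ColorSetThree" set3
      (pvBuildOne "ColorSetTwo" set2
        (pvBuildOne "ColorSetOne" set1 []))))

-- ===== PORT B =====
def build_color_set_data_classes_alt (field_specs : List (String × String)) : String :=
  let classes := ["ColorSetOne", "ColorSetTwo", "ColorSetThree"]
  let out := (PySem.List.enumerate (PySem.List.slice field_specs none (some 300))).foldl
    (fun out p =>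
      (if PySem.Int.mod p.1 100 = 0 then
        out ++ (if p.1 ≠ 0 then "\n)\n\n" else "") ++ "data class "
            ++ (classes.getD (PySem.Int.floordiv p.1 100).toNat "") ++ "(\n"
       else out ++ ",\n")
      ++ ("    val " ++ p.2.1 ++ ": Color"))
    ""
  out ++ (if out ≠ "" then "\n)" else "")

-- ===== PRECONDITION & SPEC =====
def Spec_build_color_set_data_classes (field_specs : List (String × String)) (out : String) : Prop := out = build_color_set_data_classes_alt field_specs
instance (field_specs : List (String × String)) (out : String) : Decidable (Spec_build_color_set_data_classes field_specs out) := by unfold Spec_build_color_set_data_classes; infer_instance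

-- ===== CLAIM (what is proved, stated in full; the proofs are below) =====
def Claim_equal_build_color_set_data_classes : Prop := ∀ (field_specs : List (String × String)), Dom_build_color_set_data_classes field_specs → Spec_build_color_set_data_classes field_specs (build_color_set_data_classes field_specs)

-- ===== LEMMAS AND PROOFS =====

-- the common normal form both programs are reduced to: the non-empty class blocks joined by "\n\n"
def pvBlock (cls : String) (group : List String) : String :=
  "data class " ++ cls ++ "(\n"
    ++ PySem.Str.join ",\n" (group.map (fun n => "    val " ++ n ++ ": Color"))
    ++ "\n)"

def pvS (s1 s2 s3 : List String) : String :=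
  PySem.Str.join "\n\n"
    ((if s1.isEmpty then [] else [pvBlock "ColorSetOne" s1])
      ++ ((if s2.isEmpty then [] else [pvBlock "ColorSetTwo" s2])
        ++ (if s3.isEmpty then [] else [pvBlock "ColorSetThree" s3])))

-- ---------- A-side ----------

-- the per-line strings of one block, commas placed by position (A's shape), at char level
def pvWC : List (List Char) → List (List Char)
  | [] => []
  | [x] => [x]
  | x :: y :: r => (x ++ [',']) :: pvWC (y :: r)

theorem pvWC_ne_nil (xs : List (List Char)) (h : xs ≠ []) : pvWC xs ≠ [] := by
  cases xs with
  | nil => exact absurd rfl h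
  | cons x t => cases t <;> simp [pvWC]

theorem pv_join_cons (sep x : List Char) (ys : List (List Char)) (h : ys ≠ []) :
    PySem.Chars.join sep (x :: ys) = x ++ sep ++ PySem.Chars.join sep ys := by
  cases ys with
  | nil => exact absurd rfl h
  | cons y r => exact PySem.Chars.join_cons_cons sep x y r

theorem pv_join_append (sep : List Char) (xs ys : List (List Char)) (hx : xs ≠ []) (hy : ys ≠ []) :
    PySem.Chars.join sep (xs ++ ys)
      = PySem.Chars.join sep xs ++ sep ++ PySem.Chars.join sep ys := by
  induction xs with
  | nil => exact absurd rfl hx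
  | cons x t ih =>
    cases t with
    | nil => simp [PySem.Chars.join_singleton, pv_join_cons sep x ys hy]
    | cons z r =>
      rw [List.cons_append, pv_join_cons sep x ((z :: r) ++ ys) (by simp),
          pv_join_cons sep x (z :: r) (by simp), ih (by simp)]
      simp [List.append_assoc]

theorem pv_join_pvWC (xs : List (List Char)) :
    PySem.Chars.join ['\n'] (pvWC xs) = PySem.Chars.join [',', '\n'] xs := by
  induction xs with
  | nil => simp [pvWC]
  | cons x t ih =>
    cases t with
    | nil => simp [pvWC]
    | cons z r =>
      rw [pvWC, pv_join_cons _ _ _ (pvWC_ne_nil _ (by simp)),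
          pv_join_cons [',', '\n'] x (z :: r) (by simp), ih]
      simp [List.append_assoc]

-- A's enumerated comma lines are pvWC of B's plain lines
theorem pv_enum_lines (L : Int) : ∀ (ns : List String) (k : Int), k + ns.length = L →
    ((PySem.List.enumerate ns k).map
        (fun p => "    val " ++ p.2 ++ ": Color" ++ (if p.1 < L - 1 then "," else ""))).map
      String.toList
      = pvWC (ns.map (fun s => ("    val " ++ s ++ ": Color").toList)) := by
  intro ns
  induction ns with
  | nil => intro k hk; simp [PySem.List.enumerate, pvWC]
  | cons x t ih =>
    intro k hk
    simp only [PySem.List.enumerate, List.map_cons]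
    cases t with
    | nil =>
      have : ¬ (k < L - 1) := by simp at hk; omega
      simp [PySem.List.enumerate, pvWC, this]
    | cons z r =>
      have hlt : k < L - 1 := by simp at hk; omega
      have := ih (k + 1) (by simp at hk ⊢; omega)
      simp only [List.map_cons] at this ⊢
      rw [this]
      simp [pvWC, hlt, String.toList_append]

-- build_one with a nonempty name list appends exactly these lines
def pvLines (cls : String) (names : List String) : List String :=
  ("data class " ++ cls ++ "(") ::
    ((PySem.List.enumerate names).map
      (fun p => "    val " ++ p.2 ++ ": Color" ++ (if p.1 < (names.length : Int) - 1 then "," else "")))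
    ++ [")", ""]

theorem pvBuildOne_eq (cls : String) (names : List String) (chunks : List String) :
    pvBuildOne cls names chunks
      = chunks ++ (if names.isEmpty then [] else pvLines cls names) := by
  unfold pvBuildOne pvLines
  split_ifs with h
  · simp
  · rw [PySem.List.foldl_append_singleton_eq_map]
    simp [List.append_assoc]

-- joined block lines = a block string ++ "\n"
theorem pv_block_join (cls : String) (names : List String) (h : ¬ names.isEmpty) :
    PySem.Chars.join ['\n'] ((pvLines cls names).map String.toList)
      = (pvBlock cls names).toList ++ ['\n'] := by
  have hne : names ≠ [] := by simpa [List.isEmpty_iff] using h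
  unfold pvLines pvBlock
  simp only [List.map_cons, List.map_append]
  rw [pv_enum_lines (names.length : Int) names 0 (by simp)]
  have hWC : pvWC (names.map (fun s => ("    val " ++ s ++ ": Color").toList)) ≠ [] :=
    pvWC_ne_nil _ (by simpa using hne)
  simp only [List.map_nil, List.cons_append]
  rw [pv_join_cons _ _ _ ?hne1]
  case hne1 => simp
  rw [pv_join_append _ _ _ hWC ?hne2]
  case hne2 => simp
  rw [pv_join_pvWC]
  simp [PySem.Str.toList_join, PySem.Chars.join_cons_cons, PySem.Chars.join_singleton,
        String.toList_append, List.append_assoc, Function.comp_def]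

theorem pv_rstrip_newline (s : List Char) :
    PySem.Chars.rstrip (s ++ ['\n']) = PySem.Chars.rstrip s := by
  have h1 : PySem.Chars.isspace '\n' = true := by decide
  simp [PySem.Chars.rstrip, h1]

theorem pv_rstrip_no_strip (s : List Char) (c : Char) (h : s.getLast? = some c)
    (hc : PySem.Chars.isspace c = false) : PySem.Chars.rstrip s = s := by
  have hrev : s.reverse.head? = some c := by simpa using h
  cases hr : s.reverse with
  | nil => rw [hr] at hrev; simp at hrev
  | cons d t =>
    rw [hr] at hrev
    have hd : d = c := by simpa using hrev
    have hs : PySem.Chars.rstrip s = (List.dropWhile PySem.Chars.isspace (d :: t)).reverse := by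
      simp [PySem.Chars.rstrip, hr]
    rw [hs, List.dropWhile_cons, hd, hc]
    simp only [Bool.false_eq_true, if_false]
    rw [← List.reverse_reverse s, hr, hd]

theorem pv_block_getLast (cls : String) (g : List String) :
    ((pvBlock cls g).toList).getLast? = some ')' := by
  unfold pvBlock
  have h : ("\n)" : String).toList = ['\n', ')'] := rfl
  simp [String.toList_append, List.getLast?_append, List.getLast?_cons, h]

theorem pv_tail2 (b1 b2 : List Char) (hl : b2.getLast? = some ')') :
    PySem.Chars.rstrip (b1 ++ ['\n'] ++ ['\n'] ++ (b2 ++ ['\n'])) = b1 ++ ['\n', '\n'] ++ b2 := by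
  have h1 : b1 ++ ['\n'] ++ ['\n'] ++ (b2 ++ ['\n']) = (b1 ++ ['\n'] ++ ['\n'] ++ b2) ++ ['\n'] := by simp
  rw [h1, pv_rstrip_newline,
      pv_rstrip_no_strip _ ')' (by simp [List.getLast?_append, List.getLast?_cons, hl]) (by decide)]
  simp

theorem pv_tail3 (b1 b2 b3 : List Char) (hl : b3.getLast? = some ')') :
    PySem.Chars.rstrip (b1 ++ ['\n'] ++ ['\n'] ++ (b2 ++ ['\n']) ++ ['\n'] ++ (b3 ++ ['\n']))
      = b1 ++ ['\n', '\n'] ++ (b2 ++ (['\n', '\n'] ++ b3)) := by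
  have h1 : b1 ++ ['\n'] ++ ['\n'] ++ (b2 ++ ['\n']) ++ ['\n'] ++ (b3 ++ ['\n'])
      = (b1 ++ ['\n'] ++ ['\n'] ++ (b2 ++ ['\n']) ++ ['\n'] ++ b3) ++ ['\n'] := by simp
  rw [h1, pv_rstrip_newline,
      pv_rstrip_no_strip _ ')' (by simp [List.getLast?_append, List.getLast?_cons, hl]) (by decide)]
  simp

-- A, abstracted over the three (already sliced) name lists, equals the normal form pvS
theorem pv_main (s1 s2 s3 : List String)
    (h21 : s1 = [] → s2 = []) (h32 : s2 = [] → s3 = []) :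
    PySem.Str.rstrip (PySem.Str.join "\n"
      (pvBuildOne "ColorSetThree" s3 (pvBuildOne "ColorSetTwo" s2 (pvBuildOne "ColorSetOne" s1 []))))
    = pvS s1 s2 s3 := by
  unfold pvS
  rw [pvBuildOne_eq, pvBuildOne_eq, pvBuildOne_eq]
  by_cases e1 : s1.isEmpty
  · have h1 : s1 = [] := by simpa [List.isEmpty_iff] using e1
    have h2 : s2 = [] := h21 h1
    have h3 : s3 = [] := h32 h2
    subst h1 h2 h3
    rfl
  · by_cases e2 : s2.isEmpty
    · have h2 : s2 = [] := by simpa [List.isEmpty_iff] using e2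
      have h3 : s3 = [] := h32 h2
      subst h2 h3
      simp only [List.isEmpty_nil, if_true, e1, Bool.false_eq_true, if_false, List.append_nil, List.nil_append]
      apply String.toList_inj.mp
      rw [PySem.Str.toList_rstrip, PySem.Str.toList_join, PySem.Str.toList_join,
          show ("\n" : String).toList = ['\n'] from rfl,
          show ("\n\n" : String).toList = ['\n', '\n'] from rfl,
          pv_block_join _ _ e1, pv_rstrip_newline,
          pv_rstrip_no_strip _ ')' (pv_block_getLast _ _) (by decide)]
      simp [PySem.Chars.join_singleton]
    · by_cases e3 : s3.isEmpty
      · have h3 : s3 = [] := by simpa [List.isEmpty_iff] using e3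
        subst h3
        simp only [List.isEmpty_nil, if_true, e1, e2, Bool.false_eq_true, if_false, List.append_nil, List.nil_append]
        apply String.toList_inj.mp
        rw [PySem.Str.toList_rstrip, PySem.Str.toList_join, PySem.Str.toList_join,
            show ("\n" : String).toList = ['\n'] from rfl,
            show ("\n\n" : String).toList = ['\n', '\n'] from rfl,
            List.map_append,
            pv_join_append _ _ _ (by simp [pvLines]) (by simp [pvLines]),
            pv_block_join _ _ e1, pv_block_join _ _ e2]
        rw [pv_tail2 _ _ (pv_block_getLast _ _)]
        simp [PySem.Chars.join_cons_cons, PySem.Chars.join_singleton]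
      · simp only [e1, e2, e3, Bool.false_eq_true, if_false, List.nil_append]
        apply String.toList_inj.mp
        rw [PySem.Str.toList_rstrip, PySem.Str.toList_join, PySem.Str.toList_join,
            show ("\n" : String).toList = ['\n'] from rfl,
            show ("\n\n" : String).toList = ['\n', '\n'] from rfl,
            List.map_append, List.map_append,
            pv_join_append _ _ _ (by simp [pvLines]) (by simp [pvLines]),
            pv_join_append _ _ _ (by simp [pvLines]) (by simp [pvLines]),
            pv_block_join _ _ e1, pv_block_join _ _ e2, pv_block_join _ _ e3]
        rw [pv_tail3 _ _ _ (pv_block_getLast _ _)]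
        simp [PySem.Chars.join_cons_cons, PySem.Chars.join_singleton]

theorem pvA_eq (fs : List (String × String)) :
    build_color_set_data_classes fs
      = pvS ((fs.take 100).map (fun p => p.1)) (((fs.drop 100).take 100).map (fun p => p.1))
            (((fs.drop 200).take 100).map (fun p => p.1)) := by
  unfold build_color_set_data_classes
  have hs1 : PySem.List.slice fs (some 0) (some 100) = fs.take 100 := by
    rw [PySem.List.slice_zero_start, PySem.List.slice_to fs (by norm_num)]; simp
  have hs2 : PySem.List.slice fs (some 100) (some 200) = (fs.drop 100).take 100 := by
    rw [PySem.List.slice_toNat fs (by norm_num) (by norm_num)]; simp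
  have hs3 : PySem.List.slice fs (some 200) (some 300) = (fs.drop 200).take 100 := by
    rw [PySem.List.slice_toNat fs (by norm_num) (by norm_num)]; simp
  have h21 : (fs.take 100).map (fun p => p.1) = [] → ((fs.drop 100).take 100).map (fun p => p.1) = [] := by
    intro h
    simp only [List.map_eq_nil_iff, List.take_eq_nil_iff, List.drop_eq_nil_iff] at h ⊢
    rcases h with h | h
    · omega
    · right; simp [h]
  have h32 : ((fs.drop 100).take 100).map (fun p => p.1) = [] → ((fs.drop 200).take 100).map (fun p => p.1) = [] := by
    intro h
    simp only [List.map_eq_nil_iff, List.take_eq_nil_iff, List.drop_eq_nil_iff] at h ⊢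
    rcases h with h | h
    · omega
    · right; omega
  simp only [hs1, hs2, hs3]
  exact pv_main _ _ _ h21 h32

-- ---------- B-side ----------

-- the chunk B emits for one enumerated spec
def pvCB (p : Int × (String × String)) : String :=
  (if PySem.Int.mod p.1 100 = 0 then
      (if p.1 ≠ 0 then "\n)\n\n" else "") ++ "data class "
        ++ (["ColorSetOne", "ColorSetTwo", "ColorSetThree"].getD (PySem.Int.floordiv p.1 100).toNat "") ++ "(\n"
    else ",\n")
  ++ ("    val " ++ p.2.1 ++ ": Color")

def pvCat : List (Int × (String × String)) → String
  | [] => ""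
  | p :: t => pvCB p ++ pvCat t

theorem pv_str_assoc (a b c : String) : (a ++ b) ++ c = a ++ (b ++ c) := by
  apply String.toList_inj.mp
  simp [String.toList_append, List.append_assoc]

theorem pv_foldB (l : List (Int × (String × String))) (a : String) :
    l.foldl
      (fun out p =>
        (if PySem.Int.mod p.1 100 = 0 then
          out ++ (if p.1 ≠ 0 then "\n)\n\n" else "") ++ "data class "
              ++ (["ColorSetOne", "ColorSetTwo", "ColorSetThree"].getD (PySem.Int.floordiv p.1 100).toNat "") ++ "(\n"
         else out ++ ",\n")
        ++ ("    val " ++ p.2.1 ++ ": Color")) a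
    = a ++ pvCat l := by
  induction l generalizing a with
  | nil => simp [pvCat]
  | cons p t ih =>
    rw [List.foldl_cons, ih]
    have hstep : (if PySem.Int.mod p.1 100 = 0 then
          a ++ (if p.1 ≠ 0 then "\n)\n\n" else "") ++ "data class "
              ++ (["ColorSetOne", "ColorSetTwo", "ColorSetThree"].getD (PySem.Int.floordiv p.1 100).toNat "") ++ "(\n"
         else a ++ ",\n") ++ ("    val " ++ p.2.1 ++ ": Color") = a ++ pvCB p := by
      unfold pvCB
      split_ifs <;> simp [pv_str_assoc]
    rw [hstep, pvCat, pv_str_assoc]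

theorem pvCat_append (x y : List (Int × (String × String))) :
    pvCat (x ++ y) = pvCat x ++ pvCat y := by
  induction x with
  | nil => simp [pvCat]
  | cons p t ih => simp [pvCat, ih, pv_str_assoc]

def pvCatLines : List (String × String) → String
  | [] => ""
  | p :: t => (",\n" ++ ("    val " ++ p.1 ++ ": Color")) ++ pvCatLines t

theorem pv_cat_tail (t : List (String × String)) : ∀ (k s : Int), 0 ≤ s → s % 100 = 0 →
    s < k → k + t.length ≤ s + 100 →
    pvCat (PySem.List.enumerate t k) = pvCatLines t := by
  induction t with
  | nil => intro k s _ _ _ _; simp [PySem.List.enumerate, pvCat, pvCatLines]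
  | cons p r ih =>
    intro k s hs hm hlt hle
    rw [PySem.List.enumerate_cons, pvCat, pvCatLines]
    have hmk : PySem.Int.mod k 100 ≠ 0 := by
      rw [PySem.Int.mod_eq_emod_of_pos (by norm_num)]
      simp only [List.length_cons] at hle
      omega
    have hcb : pvCB (k, p) = ",\n" ++ ("    val " ++ p.1 ++ ": Color") := by
      unfold pvCB
      rw [if_neg hmk]
    rw [hcb, ih (k + 1) s hs hm (by omega) (by simp at hle ⊢; omega)]

theorem pv_lines_join (t : List (String × String)) : ∀ (p : String × String),
    ("    val " ++ p.1 ++ ": Color") ++ pvCatLines t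
      = PySem.Str.join ",\n" ((p :: t).map (fun q => "    val " ++ q.1 ++ ": Color")) := by
  induction t with
  | nil =>
    intro p
    apply String.toList_inj.mp
    simp [pvCatLines, PySem.Str.toList_join, PySem.Chars.join_singleton]
  | cons q r ih =>
    intro p
    apply String.toList_inj.mp
    have := congrArg String.toList (ih q)
    rw [PySem.Str.toList_join] at this
    rw [PySem.Str.toList_join]
    simp only [List.map_cons] at this ⊢
    rw [PySem.Chars.join_cons_cons]
    simp only [String.toList_append, pvCatLines] at this ⊢
    rw [← this]
    simp [show (",\n" : String).toList = [',', '\n'] from rfl]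

-- one non-empty ≤100-element group starting at index s (s ∈ {0,100,200})
theorem pv_cat_seg (g : List (String × String)) (hg : g ≠ []) (hlen : g.length ≤ 100)
    (s : Int) (h0 : 0 ≤ s) (hm : s % 100 = 0) :
    pvCat (PySem.List.enumerate g s)
      = (if s ≠ 0 then "\n)\n\n" else "")
        ++ ("data class "
          ++ (["ColorSetOne", "ColorSetTwo", "ColorSetThree"].getD (PySem.Int.floordiv s 100).toNat "")
          ++ "(\n")
        ++ PySem.Str.join ",\n" (g.map (fun q => "    val " ++ q.1 ++ ": Color")) := by
  cases g with
  | nil => exact absurd rfl hg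
  | cons p t =>
    rw [PySem.List.enumerate_cons, pvCat]
    have hms : PySem.Int.mod s 100 = 0 := by
      rw [PySem.Int.mod_eq_emod_of_pos (by norm_num)]; exact hm
    have hcb : pvCB (s, p) = (if s ≠ 0 then "\n)\n\n" else "")
        ++ ("data class "
          ++ (["ColorSetOne", "ColorSetTwo", "ColorSetThree"].getD (PySem.Int.floordiv s 100).toNat "")
          ++ "(\n")
        ++ ("    val " ++ p.1 ++ ": Color") := by
      unfold pvCB
      rw [if_pos hms]
      simp [pv_str_assoc]
    rw [hcb, pv_cat_tail t (s + 1) s h0 hm (by omega) (by simp at hlen ⊢; omega),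
        pv_str_assoc, pv_str_assoc, pv_lines_join]
    simp [pv_str_assoc]

theorem pv_empty_app (s : String) : "" ++ s = s := by
  apply String.toList_inj.mp; simp

theorem pv_app_empty (s : String) : s ++ "" = s := by
  apply String.toList_inj.mp; simp

theorem pv_ne_empty (a b : String) (ha : a.toList ≠ []) : a ++ b ≠ "" := by
  intro h
  have h2 := congrArg String.toList h
  rw [String.toList_append] at h2
  exact ha (List.append_eq_nil_iff.mp h2).1

theorem pvB_eq (fs : List (String × String)) :
    build_color_set_data_classes_alt fs
      = pvS ((fs.take 100).map (fun p => p.1)) (((fs.drop 100).take 100).map (fun p => p.1))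
            (((fs.drop 200).take 100).map (fun p => p.1)) := by
  by_cases c1 : fs = []
  · subst c1; decide
  have hsl : PySem.List.slice fs none (some 300) = fs.take 300 := by
    rw [PySem.List.slice_to fs (by norm_num)]; simp
  have hsplit : fs.take 300 = fs.take 100 ++ ((fs.drop 100).take 100 ++ (fs.drop 200).take 100) := by
    rw [show (300 : Nat) = 100 + 200 from rfl, List.take_add,
        show (200 : Nat) = 100 + 100 from rfl, List.take_add, List.drop_drop]
  simp only [build_color_set_data_classes_alt, hsl, hsplit, PySem.List.enumerate_append]
  rw [pv_foldB, pvCat_append, pvCat_append]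
  have hg1 : List.take 100 fs ≠ [] := by simp [List.take_eq_nil_iff, c1]
  have hlen1 : (List.take 100 fs).length ≤ 100 := by simp
  have k0 : (["ColorSetOne", "ColorSetTwo", "ColorSetThree"].getD (PySem.Int.floordiv 0 100).toNat "") = "ColorSetOne" := by decide
  have k1 : (["ColorSetOne", "ColorSetTwo", "ColorSetThree"].getD (PySem.Int.floordiv 100 100).toNat "") = "ColorSetTwo" := by decide
  have k2 : (["ColorSetOne", "ColorSetTwo", "ColorSetThree"].getD (PySem.Int.floordiv 200 100).toNat "") = "ColorSetThree" := by decide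
  rw [pv_cat_seg _ hg1 hlen1 0 (by norm_num) (by norm_num), k0]
  by_cases c2 : fs.length ≤ 100
  · have hd1 : List.drop 100 fs = [] := by rw [List.drop_eq_nil_iff]; omega
    have hd2 : List.drop 200 fs = [] := by rw [List.drop_eq_nil_iff]; omega
    rw [hd1, hd2]
    simp only [List.take_nil, PySem.List.enumerate_nil, pvCat, List.map_nil]
    simp only [ne_eq, not_true_eq_false, if_false,
      pv_empty_app, pv_app_empty, pv_str_assoc]
    rw [if_pos (pv_ne_empty _ _ (by decide))]
    have hne1 : (List.map (fun p => p.1) (List.take 100 fs)).isEmpty = false := by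
      simp [c1]
    unfold pvS
    rw [hne1]
    simp only [Bool.false_eq_true, if_false, List.isEmpty_nil, if_true, List.append_nil]
    apply String.toList_inj.mp
    rw [PySem.Str.toList_join, List.map_cons, List.map_nil, PySem.Chars.join_singleton]
    simp [pvBlock, String.toList_append, List.map_map, Function.comp_def]
  · have l1 : (List.take 100 fs).length = 100 := by rw [List.length_take]; omega
    have e2 : (0 : Int) + ((List.take 100 fs).length : Int) = 100 := by rw [l1]; norm_num
    rw [e2]
    have hg2 : List.take 100 (List.drop 100 fs) ≠ [] := by
      simp [List.take_eq_nil_iff, List.drop_eq_nil_iff]; omega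
    have hlen2 : (List.take 100 (List.drop 100 fs)).length ≤ 100 := by simp
    rw [pv_cat_seg _ hg2 hlen2 100 (by norm_num) (by norm_num), k1]
    have hne1 : (List.map (fun p : String × String => p.1) (List.take 100 fs)).isEmpty = false := by
      simp [c1]
    have hne2 : (List.map (fun p : String × String => p.1) (List.take 100 (List.drop 100 fs))).isEmpty = false := by
      simp [List.take_eq_nil_iff, List.drop_eq_nil_iff]; omega
    by_cases c3 : fs.length ≤ 200
    · have hd2 : List.drop 200 fs = [] := by rw [List.drop_eq_nil_iff]; omega
      rw [hd2]
      simp only [List.take_nil, PySem.List.enumerate_nil, pvCat, List.map_nil]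
      rw [if_pos (show (100 : Int) ≠ 0 by norm_num), if_neg (show ¬ ((0 : Int) ≠ 0) by norm_num)]
      simp only [pv_empty_app, pv_app_empty, pv_str_assoc]
      rw [if_pos (pv_ne_empty _ _ (by decide))]
      unfold pvS
      rw [hne1, hne2]
      simp only [Bool.false_eq_true, if_false, List.isEmpty_nil, if_true, List.append_nil]
      apply String.toList_inj.mp
      rw [PySem.Str.toList_join]
      simp only [List.singleton_append]
      rw [List.map_cons, List.map_cons, List.map_nil,
          PySem.Chars.join_cons_cons, PySem.Chars.join_singleton]
      simp [pvBlock, String.toList_append, List.append_assoc, List.map_map, Function.comp_def,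
        show ("\n)\n\n" : String).toList = ['\n', ')', '\n', '\n'] from rfl,
        show ("\n\n" : String).toList = ['\n', '\n'] from rfl,
        show ("\n)" : String).toList = ['\n', ')'] from rfl]
    · have l2 : (List.take 100 (List.drop 100 fs)).length = 100 := by
        rw [List.length_take, List.length_drop]; omega
      have e3 : (100 : Int) + ((List.take 100 (List.drop 100 fs)).length : Int) = 200 := by
        rw [l2]; norm_num
      rw [e3]
      have hg3 : List.take 100 (List.drop 200 fs) ≠ [] := by
        simp [List.take_eq_nil_iff, List.drop_eq_nil_iff]; omega
      have hlen3 : (List.take 100 (List.drop 200 fs)).length ≤ 100 := by simp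
      rw [pv_cat_seg _ hg3 hlen3 200 (by norm_num) (by norm_num), k2]
      have hne3 : (List.map (fun p : String × String => p.1) (List.take 100 (List.drop 200 fs))).isEmpty = false := by
        simp [List.take_eq_nil_iff, List.drop_eq_nil_iff]; omega
      rw [if_pos (show (100 : Int) ≠ 0 by norm_num), if_pos (show (200 : Int) ≠ 0 by norm_num),
          if_neg (show ¬ ((0 : Int) ≠ 0) by norm_num)]
      simp only [pv_empty_app, pv_str_assoc]
      rw [if_pos (pv_ne_empty _ _ (by decide))]
      unfold pvS
      rw [hne1, hne2, hne3]
      simp only [Bool.false_eq_true, if_false]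
      apply String.toList_inj.mp
      rw [PySem.Str.toList_join]
      simp only [List.singleton_append]
      rw [List.map_cons, List.map_cons, List.map_cons, List.map_nil,
          PySem.Chars.join_cons_cons, PySem.Chars.join_cons_cons, PySem.Chars.join_singleton]
      simp [pvBlock, String.toList_append, List.append_assoc, List.map_map, Function.comp_def,
        show ("\n)\n\n" : String).toList = ['\n', ')', '\n', '\n'] from rfl,
        show ("\n\n" : String).toList = ['\n', '\n'] from rfl,
        show ("\n)" : String).toList = ['\n', ')'] from rfl]

-- ===== VERDICT (by name: the statement is the Claim_ definition above) =====
theorem build_color_set_data_classes_spec : Claim_equal_build_color_set_data_classes := by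
  intro fs _
  unfold Spec_build_color_set_data_classes
  rw [pvA_eq, pvB_eq]
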